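-- pv_equiv track=rewrite | github.com/Doogie201/NextLevelApex | nextlevelapex/core/dns_diagnose.py | _is_plaintext_upstream
-- ===== SOURCE A (Python) =====
-- PLAINTEXT_RESOLVERS = (
--     "8.8.8.8",
--     "8.8.4.4",
--     "1.1.1.1",
--     "1.0.0.1",
--     "9.9.9.9",
--     "208.67.222.222",
--     "208.67.220.220",
-- )
--
-- def _is_plaintext_upstream(upstream_value: str) -> bool | None:
--     if upstream_value == "unknown":
--         return None
--     items = [x.strip().lower() for x in upstream_value.split(",") if x.strip()]
--     if not items:
--         return None
--     for item in items:
--         for resolver in PLAINTEXT_RESOLVERS: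
--             if item == resolver or item.startswith((f"{resolver}:53", f"{resolver}#53")):
--                 return True
--     return False
-- ===== SOURCE B (Python) =====
-- PLAINTEXT_RESOLVERS = (
--     "8.8.8.8",
--     "8.8.4.4",
--     "1.1.1.1",
--     "1.0.0.1",
--     "9.9.9.9",
--     "208.67.222.222",
--     "208.67.220.220",
-- )
--
-- RESOLVER_SET = set(PLAINTEXT_RESOLVERS)
--
--
-- def _match(item):
--     # split at the earliest ':' or '#', if any
--     for p, c in enumerate(item):
--         if c == ':' or c == '#':
--             return item[:p] in RESOLVER_SET and item[p + 1:].startswith("53")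
--     return item in RESOLVER_SET
--
--
-- def _is_plaintext_upstream(upstream_value: str):
--     if upstream_value == "unknown":
--         return None
--     items = [x.strip().lower() for x in upstream_value.split(",") if x.strip()]
--     if not items:
--         return None
--     return any(map(_match, items))
-- ===== Notes on version B (the rewrite author's own statement) =====
-- stated objective: idiomatic
-- what changed: Instead of testing each item against all 7 resolvers with string-prefix checks, B scans each item once for the earliest ':'/'#' separator, then does a single set membership of the base plus a '53' prefix check on the rest.
import Mathlib
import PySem

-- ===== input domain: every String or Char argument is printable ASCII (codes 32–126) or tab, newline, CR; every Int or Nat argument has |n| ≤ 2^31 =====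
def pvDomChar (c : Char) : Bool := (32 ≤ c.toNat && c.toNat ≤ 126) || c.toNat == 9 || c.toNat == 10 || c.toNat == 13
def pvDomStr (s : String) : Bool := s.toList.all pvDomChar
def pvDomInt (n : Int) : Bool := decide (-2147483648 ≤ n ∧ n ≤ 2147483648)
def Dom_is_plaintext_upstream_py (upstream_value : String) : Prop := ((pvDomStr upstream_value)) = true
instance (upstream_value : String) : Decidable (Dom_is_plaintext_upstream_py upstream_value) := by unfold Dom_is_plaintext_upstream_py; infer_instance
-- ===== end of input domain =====

-- B replaces the per-item scan over all 7 resolvers by one pass locating the first ':'/'#'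
-- separator followed by a single set membership test (idiomatic; not measured faster).

-- ===== PORT A =====
def pvResolvers : List String :=
  ["8.8.8.8", "8.8.4.4", "1.1.1.1", "1.0.0.1", "9.9.9.9", "208.67.222.222", "208.67.220.220"]

def pvAOne (item r : String) : Bool :=
  item == r || PySem.Str.startswith item (r ++ ":53") || PySem.Str.startswith item (r ++ "#53")

def is_plaintext_upstream_py (upstream_value : String) : Option Bool :=
  if upstream_value == "unknown" then none
  else
    let items := ((PySem.Str.split? upstream_value ",").getD []).filterMap
      (fun x => if PySem.Str.strip x == "" then none
                else some (PySem.Str.lower (PySem.Str.strip x)))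
    if items = [] then none
    else some (items.any (fun item => pvResolvers.any (fun r => pvAOne item r)))

-- ===== PORT B =====
def pvResolverSet : PySem.Set String := PySem.Set.ofList pvResolvers

def pvIsSep (c : Char) : Bool := c == ':' || c == '#'

-- one left-to-right pass: `pre` is the (reversed) part before the first separator
def pvMatchGo (pre : List Char) : List Char → Bool
  | [] => PySem.Set.contains pvResolverSet (String.ofList pre.reverse)
  | c :: rest =>
    if pvIsSep c then
      PySem.Set.contains pvResolverSet (String.ofList pre.reverse)
        && PySem.Chars.startswith rest ['5', '3']
    else pvMatchGo (c :: pre) rest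

def is_plaintext_upstream_py_alt (upstream_value : String) : Option Bool :=
  if upstream_value == "unknown" then none
  else
    let items := ((PySem.Str.split? upstream_value ",").getD []).filterMap
      (fun x => if PySem.Str.strip x == "" then none
                else some (PySem.Str.lower (PySem.Str.strip x)))
    if items = [] then none
    else some (items.any (fun item => pvMatchGo [] item.toList))

-- ===== PRECONDITION & SPEC =====
def Spec_is_plaintext_upstream_py (upstream_value : String) (out : Option Bool) : Prop := out = is_plaintext_upstream_py_alt upstream_value
instance (upstream_value : String) (out : Option Bool) : Decidable (Spec_is_plaintext_upstream_py upstream_value out) := by unfold Spec_is_plaintext_upstream_py; infer_instance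

-- ===== CLAIM (what is proved, stated in full; the proofs are below) =====
def Claim_equal_is_plaintext_upstream_py : Prop := ∀ (upstream_value : String), Dom_is_plaintext_upstream_py upstream_value → Spec_is_plaintext_upstream_py upstream_value (is_plaintext_upstream_py upstream_value)

-- ===== LEMMAS AND PROOFS =====

-- string equality via toList
theorem pvStrEq (s t : String) : s = t ↔ s.toList = t.toList := ⟨fun h => h ▸ rfl, String.ext⟩

-- membership in the resolver set, as an `any` over the resolver list
theorem pvContainsResolvers (s : String) :
    PySem.Set.contains pvResolverSet s = pvResolvers.any (fun r => s == r) := by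
  rw [Bool.eq_iff_iff]
  simp [pvResolverSet, pvResolvers, PySem.Set.contains, PySem.Set.ofList, PySem.Set.add]

theorem pvResolversNosep : ∀ r ∈ pvResolvers, ∀ ch ∈ r.toList, pvIsSep ch = false := by
  have h : pvResolvers.all (fun r => r.toList.all (fun ch => !pvIsSep ch)) = true := by decide
  simp only [List.all_eq_true, Bool.not_eq_eq_eq_not, Bool.not_true] at h
  exact h

-- a separator-headed tail forces prefix comparison to align at the first separator
theorem pvSepPrefix {x y : Char} (hx : pvIsSep x = true) (hy : pvIsSep y = true) :
    ∀ (a b u v : List Char), (∀ c ∈ a, pvIsSep c = false) → (∀ c ∈ b, pvIsSep c = false) →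
      ((a ++ x :: u) <+: (b ++ y :: v) ↔ (a = b ∧ x = y ∧ u <+: v)) := by
  intro a
  induction a with
  | nil =>
    intro b u v _ hb
    cases b with
    | nil => simp [List.cons_prefix_cons]
    | cons d b' =>
      simp only [List.nil_append, List.cons_append, List.cons_prefix_cons]
      constructor
      · rintro ⟨rfl, -⟩
        have h := hb x (by simp)
        rw [hx] at h; cases h
      · rintro ⟨h, -⟩; cases h
  | cons c a' ih =>
    intro b u v ha hb
    cases b with
    | nil =>
      simp only [List.cons_append, List.nil_append, List.cons_prefix_cons]
      constructor
      · rintro ⟨rfl, -⟩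
        have h := ha c (by simp)
        rw [hy] at h; cases h
      · rintro ⟨h, -⟩; cases h
    | cons d b' =>
      simp only [List.cons_append, List.cons_prefix_cons]
      rw [ih b' u v (fun e he => ha e (by simp [he])) (fun e he => hb e (by simp [he]))]
      simp only [List.cons.injEq]
      tauto

-- on a separator-free item, A's test degenerates to plain equality
theorem pvAOneNosep (s r : String) (hs : ∀ c ∈ s.toList, pvIsSep c = false) :
    pvAOne s r = (s == r) := by
  have h1 : PySem.Str.startswith s (r ++ ":53") = false := by
    cases h : PySem.Str.startswith s (r ++ ":53") with
    | false => rfl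
    | true =>
      exfalso
      rw [PySem.Str.startswith_eq, PySem.Chars.startswith_iff] at h
      have hmem : ':' ∈ s.toList := h.subset (by simp)
      have h2 := hs ':' hmem
      rw [show pvIsSep ':' = true from rfl] at h2; cases h2
  have h2 : PySem.Str.startswith s (r ++ "#53") = false := by
    cases h : PySem.Str.startswith s (r ++ "#53") with
    | false => rfl
    | true =>
      exfalso
      rw [PySem.Str.startswith_eq, PySem.Chars.startswith_iff] at h
      have hmem : '#' ∈ s.toList := h.subset (by simp)
      have h3 := hs '#' hmem
      rw [show pvIsSep '#' = true from rfl] at h3; cases h3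
  simp only [pvAOne, h1, h2, Bool.or_false]

-- on an item whose first separator is c, A's test is: base in resolvers AND rest startswith 53
theorem pvAOneSep (r : String) (pre rest : List Char) (c : Char)
    (hpre : ∀ ch ∈ pre, pvIsSep ch = false)
    (hr : ∀ ch ∈ r.toList, pvIsSep ch = false) (hc : pvIsSep c = true) :
    pvAOne (String.ofList (pre.reverse ++ c :: rest)) r
      = (decide (r.toList = pre.reverse) && PySem.Chars.startswith rest ['5', '3']) := by
  have hprer : ∀ ch ∈ pre.reverse, pvIsSep ch = false :=
    fun ch h => hpre ch (List.mem_reverse.mp h)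
  have heq : (String.ofList (pre.reverse ++ c :: rest) = r) ↔ False := by
    constructor
    · intro h
      have hc' : c ∈ r.toList := by rw [← h]; simp
      rw [hr c hc'] at hc; cases hc
    · intro h; cases h
  have hsw1 : PySem.Str.startswith (String.ofList (pre.reverse ++ c :: rest)) (r ++ ":53") = true
      ↔ (r.toList = pre.reverse ∧ ':' = c ∧ ['5', '3'] <+: rest) := by
    rw [PySem.Str.startswith_eq, PySem.Chars.startswith_iff]
    have ht : (r ++ ":53").toList = r.toList ++ ':' :: ['5', '3'] := by simp
    rw [String.toList_ofList, ht,
      pvSepPrefix (show pvIsSep ':' = true from rfl) hc r.toList pre.reverse _ _ hr hprer]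
  have hsw2 : PySem.Str.startswith (String.ofList (pre.reverse ++ c :: rest)) (r ++ "#53") = true
      ↔ (r.toList = pre.reverse ∧ '#' = c ∧ ['5', '3'] <+: rest) := by
    rw [PySem.Str.startswith_eq, PySem.Chars.startswith_iff]
    have ht : (r ++ "#53").toList = r.toList ++ '#' :: ['5', '3'] := by simp
    rw [String.toList_ofList, ht,
      pvSepPrefix (show pvIsSep '#' = true from rfl) hc r.toList pre.reverse _ _ hr hprer]
  have hcc : c = ':' ∨ c = '#' := by
    simpa [pvIsSep] using hc
  rw [Bool.eq_iff_iff]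
  simp only [pvAOne, Bool.or_eq_true, Bool.and_eq_true, beq_iff_eq, heq,
    decide_eq_true_iff, hsw1, hsw2, PySem.Chars.startswith_iff]
  rcases hcc with rfl | rfl <;> constructor <;> intro h <;> tauto

theorem go_spec : ∀ (l pre : List Char), (∀ c ∈ pre, pvIsSep c = false) →
    pvMatchGo pre l = pvResolvers.any (fun r => pvAOne (String.ofList (pre.reverse ++ l)) r) := by
  intro l
  induction l with
  | nil =>
    intro pre hpre
    rw [pvMatchGo, pvContainsResolvers, List.append_nil]
    refine PySem.List.any_congr_mem (fun r hr => ?_)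
    exact (pvAOneNosep _ r (by
      intro ch h
      exact hpre ch (List.mem_reverse.mp (by simpa using h)))).symm
  | cons c rest ih =>
    intro pre hpre
    cases hc : pvIsSep c with
    | true =>
      simp only [pvMatchGo, hc, if_true]
      have hA : pvResolvers.any (fun r => pvAOne (String.ofList (pre.reverse ++ c :: rest)) r)
          = pvResolvers.any (fun r => decide (r.toList = pre.reverse)
              && PySem.Chars.startswith rest ['5', '3']) :=
        PySem.List.any_congr_mem (fun r hr => pvAOneSep r pre rest c hpre (pvResolversNosep r hr) hc)
      rw [hA, pvContainsResolvers]
      cases hsw : PySem.Chars.startswith rest ['5', '3'] with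
      | false =>
        simp only [Bool.and_false]
        symm
        rw [List.any_eq_false]
        intro r hr
        decide
      | true =>
        simp only [Bool.and_true]
        refine PySem.List.any_congr_mem (fun r hr => ?_)
        rw [Bool.eq_iff_iff]
        simp only [beq_iff_eq, decide_eq_true_eq, pvStrEq, String.toList_ofList]
        exact eq_comm
    | false =>
      simp only [pvMatchGo, hc, Bool.false_eq_true, if_false]
      rw [ih (c :: pre) (by
        intro e he
        rcases List.mem_cons.mp he with rfl | he'
        · exact hc
        · exact hpre e he')]
      simp [List.reverse_cons, List.append_assoc]

theorem item_spec (item : String) :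
    pvMatchGo [] item.toList = pvResolvers.any (fun r => pvAOne item r) := by
  have h := go_spec item.toList [] (by intro c hc; cases hc)
  simpa using h

-- ===== VERDICT (by name: the statement is the Claim_ definition above) =====
theorem is_plaintext_upstream_py_spec : Claim_equal_is_plaintext_upstream_py := by
  intro s _
  unfold Spec_is_plaintext_upstream_py is_plaintext_upstream_py is_plaintext_upstream_py_alt
  simp only [item_spec]
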